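-- pv_equiv track=rewrite | github.com/versenyi98/advent-of-code-solutions | solutions/2024/Day 19 - Linen Layout/main.py | get_number_of_all_paths
-- ===== SOURCE A (Python) =====
-- def get_number_of_all_paths(graph, index, pattern, visited):
--   if index in visited:
--     return visited[index]
--   if index == len(pattern):
--     return 1
--   if index > len(pattern):
--     return 0
--   visited[index] = sum(get_number_of_all_paths(graph, neighbor, pattern, visited) for neighbor in graph[index])
--   return visited[index]
-- ===== SOURCE B (Python) =====
-- def get_number_of_all_paths(graph, index, pattern, visited):
--     # Round-based (Kahn-layered) fixpoint DP over ALL graph positions instead of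
--     # A's memoised top-down recursion.  Return value only: A caches results into
--     # `visited` in place, B never mutates its arguments.
--     L = len(pattern)
--     if index in visited:
--         return visited[index]
--     if index == L:
--         return 1
--     if index > L:
--         return 0
--
--     def resolve(n, w):
--         # the known path count for position n, or None if not yet computed
--         if n in visited:
--             return visited[n]
--         if n == L:
--             return 1
--         if n > L:
--             return 0
--         return w.get(n)
--
--     w = {}
--     for _ in range(len(graph) + 1):
--         for i in graph:
--             if i < L and i not in visited and i not in w:
--                 vals = [resolve(n, w) for n in graph[i]]
--                 if None not in vals:
--                     w[i] = sum(vals)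
--     return w[index]
-- ===== Notes on version B (the rewrite author's own statement) =====
-- stated objective: alternative
-- what changed: Replaces A's memoised top-down recursion (which caches into `visited` in place) by an iterative round-based (Kahn-layered) fixpoint DP that fills a fresh table over the graph's positions; B matches A's return value on every input A returns on and never mutates its arguments.
import Mathlib
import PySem

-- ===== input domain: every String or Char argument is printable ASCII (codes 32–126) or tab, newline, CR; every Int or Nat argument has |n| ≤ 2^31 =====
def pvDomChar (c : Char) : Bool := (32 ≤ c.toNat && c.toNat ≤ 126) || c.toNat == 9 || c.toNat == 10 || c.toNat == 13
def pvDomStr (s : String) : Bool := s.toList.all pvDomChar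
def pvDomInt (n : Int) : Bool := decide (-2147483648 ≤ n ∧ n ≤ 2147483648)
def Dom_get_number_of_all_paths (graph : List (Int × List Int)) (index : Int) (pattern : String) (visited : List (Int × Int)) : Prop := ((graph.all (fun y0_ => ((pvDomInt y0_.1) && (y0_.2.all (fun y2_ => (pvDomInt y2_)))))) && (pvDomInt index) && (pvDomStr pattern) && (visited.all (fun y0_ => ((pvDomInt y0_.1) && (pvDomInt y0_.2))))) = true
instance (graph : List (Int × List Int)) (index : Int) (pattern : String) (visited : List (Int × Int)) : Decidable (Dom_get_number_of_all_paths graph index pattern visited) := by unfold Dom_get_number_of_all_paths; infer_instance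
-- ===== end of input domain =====

-- B replaces A's memoised top-down recursion by an iterative round-based (Kahn-layered)
-- fixpoint DP over the graph's positions; return value only: A caches results into
-- `visited` in place, B never mutates its arguments.

-- ===== PORT A =====
-- Fuel-indexed transliteration of A's recursion, threading the mutated `visited` dict.
-- The fuel (#keys + 1) only makes the recursion total: under Pre_ the call depth is at
-- most rank(index) + 1 ≤ #keys + 1, so it is never exhausted.  Where Python raises
-- KeyError (graph[index] missing) the port returns 0; Pre_ excludes those inputs.
def pvAgo (g : PySem.Dict Int (List Int)) (L : Int) : Nat → Int → PySem.Dict Int Int → Int × PySem.Dict Int Int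
  | 0, _, vis => (0, vis)
  | fuel+1, index, vis =>
    match vis.get? index with
    | some v => (v, vis)
    | none =>
      if index = L then (1, vis)
      else if index > L then (0, vis)
      else
        match g.get? index with
        | none => (0, vis)
        | some ns =>
          let r := ns.foldl (fun (acc : Int × PySem.Dict Int Int) n =>
              let p := pvAgo g L fuel n acc.2
              (acc.1 + p.1, p.2)) (0, vis)
          let vis' := r.2.insert index r.1
          ((vis'.get? index).getD 0, vis')

def get_number_of_all_paths (graph : List (Int × List Int)) (index : Int) (pattern : String) (visited : List (Int × Int)) : Int :=
  (pvAgo (PySem.Dict.mk graph) (PySem.Str.len pattern)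
    ((PySem.Dict.mk graph).keys.length + 1) index (PySem.Dict.mk visited)).1

-- ===== PORT B =====
-- `resolve(n, w)` of Source B: the known path count for position n, or none if not yet computed.
def pvResolve (vis0 : PySem.Dict Int Int) (L : Int) (w : PySem.Dict Int Int) (n : Int) : Option Int :=
  match vis0.get? n with
  | some v => some v
  | none => if n = L then some 1 else if n > L then some 0 else w.get? n

-- one `for i in graph:` round of Source B's fixpoint loop
def pvRound (g : PySem.Dict Int (List Int)) (vis0 : PySem.Dict Int Int) (L : Int) (w : PySem.Dict Int Int) : PySem.Dict Int Int :=
  g.keys.foldl (fun w i =>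
    if i < L ∧ vis0.get? i = none ∧ w.get? i = none then
      let vals := (g.getD i []).map (pvResolve vis0 L w)
      if vals.all Option.isSome then w.insert i ((vals.map (fun o => o.getD 0)).sum) else w
    else w) w

def get_number_of_all_paths_alt (graph : List (Int × List Int)) (index : Int) (pattern : String) (visited : List (Int × Int)) : Int :=
  let L := PySem.Str.len pattern
  let vis := PySem.Dict.mk visited
  match vis.get? index with
  | some v => v
  | none =>
    if index = L then 1
    else if index > L then 0
    else
      let g := PySem.Dict.mk graph
      let w := (List.range (g.keys.length + 1)).foldl (fun w _ => pvRound g vis L w) PySem.Dict.empty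
      -- `return w[index]`: under Pre_ the table always contains `index`, so the
      -- 0 default (Python: KeyError) is unreachable.
      (w.get? index).getD 0

-- ===== PRECONDITION & SPEC =====
-- pvGoodRank g vis L t n = "position n has rank ≤ t in A's dependency order": n is
-- already settled (in `visited`, or ≥ len(pattern)), or n is a graph key all of whose
-- neighbours have rank ≤ t - 1.
def pvGoodRank (g : PySem.Dict Int (List Int)) (vis : PySem.Dict Int Int) (L : Int) : Nat → Int → Bool
  | 0, n => !(decide (n < L) && (vis.get? n).isNone)
  | t+1, n =>
    (!(decide (n < L) && (vis.get? n).isNone)) ||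
      (match g.get? n with
       | none => false
       | some ns => ns.all (pvGoodRank g vis L t))

-- Pre_ excludes exactly the inputs on which A raises: a position needed by the recursion
-- that is missing from `graph` (KeyError) or a cyclic dependency through unvisited
-- positions (unbounded recursion).  Both are equivalent to `index` having no finite rank
-- (ranks are bounded by the number of keys) in the dependency order.
def Pre_get_number_of_all_paths (graph : List (Int × List Int)) (index : Int) (pattern : String) (visited : List (Int × Int)) : Prop :=
  pvGoodRank (PySem.Dict.mk graph) (PySem.Dict.mk visited) (PySem.Str.len pattern)
    ((PySem.Dict.mk graph).keys.length) index = true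
instance (graph : List (Int × List Int)) (index : Int) (pattern : String) (visited : List (Int × Int)) : Decidable (Pre_get_number_of_all_paths graph index pattern visited) := by unfold Pre_get_number_of_all_paths; infer_instance

def pvWitness_get_number_of_all_paths : (List (Int × List Int)) × Int × String × (List (Int × Int)) :=
  ([(0, [2]), (1, [0])], 1, "ab", [])

def Spec_get_number_of_all_paths (graph : List (Int × List Int)) (index : Int) (pattern : String) (visited : List (Int × Int)) (out : Int) : Prop := out = get_number_of_all_paths_alt graph index pattern visited
instance (graph : List (Int × List Int)) (index : Int) (pattern : String) (visited : List (Int × Int)) (out : Int) : Decidable (Spec_get_number_of_all_paths graph index pattern visited out) := by unfold Spec_get_number_of_all_paths; infer_instance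

-- ===== CLAIM (what is proved, stated in full; the proofs are below) =====
def Claim_equal_get_number_of_all_paths : Prop := ∀ (graph : List (Int × List Int)) (index : Int) (pattern : String) (visited : List (Int × Int)), Dom_get_number_of_all_paths graph index pattern visited → Pre_get_number_of_all_paths graph index pattern visited → Spec_get_number_of_all_paths graph index pattern visited (get_number_of_all_paths graph index pattern visited)

-- ===== LEMMAS AND PROOFS =====

-- The common pure reference value: A's recurrence computed top-down without memoisation,
-- consulting the ORIGINAL visited dict first (fuel-indexed; pvCnt_good_irrel shows any
-- fuel above the rank gives the same value).
def pvCnt (g : PySem.Dict Int (List Int)) (vis : PySem.Dict Int Int) (L : Int) : Nat → Int → Int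
  | 0, _ => 0
  | f+1, i =>
    match vis.get? i with
    | some v => v
    | none =>
      if i = L then 1
      else if i > L then 0
      else
        match g.get? i with
        | none => 0
        | some ns => (ns.map (fun n => pvCnt g vis L f n)).sum

theorem pvCnt_unf (g : PySem.Dict Int (List Int)) (vis : PySem.Dict Int Int) (L : Int)
    (f : Nat) (i : Int) :
    pvCnt g vis L (f+1) i
      = (match vis.get? i with
         | some v => v
         | none =>
           if i = L then 1
           else if i > L then 0
           else
             match g.get? i with
             | none => 0
             | some ns => (ns.map (fun n => pvCnt g vis L f n)).sum) := rfl

theorem pvGoodRank_unf (g : PySem.Dict Int (List Int)) (vis : PySem.Dict Int Int) (L : Int)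
    (s : Nat) (m : Int) :
    pvGoodRank g vis L (s+1) m
      = ((!(decide (m < L) && (vis.get? m).isNone)) ||
          (match g.get? m with
           | none => false
           | some ns => ns.all (pvGoodRank g vis L s))) := rfl

theorem pvGoodRank_mono (g : PySem.Dict Int (List Int)) (vis : PySem.Dict Int Int) (L : Int) :
    ∀ t n, pvGoodRank g vis L t n = true → pvGoodRank g vis L (t+1) n = true := by
  intro t
  induction t with
  | zero =>
    intro n h
    rw [pvGoodRank_unf]
    simp only [Bool.or_eq_true]
    exact Or.inl (by simpa [pvGoodRank] using h)
  | succ t ih =>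
    intro n h
    rw [pvGoodRank_unf] at h
    rw [pvGoodRank_unf]
    simp only [Bool.or_eq_true] at h ⊢
    rcases h with h | h
    · exact Or.inl h
    · right
      revert h
      cases hg : g.get? n with
      | none => intro h; simp at h
      | some ns =>
        intro h
        dsimp only at h ⊢
        simp only [List.all_eq_true] at h ⊢
        exact fun x hx => ih x (h x hx)

theorem pvGoodRank_le (g : PySem.Dict Int (List Int)) (vis : PySem.Dict Int Int) (L : Int)
    {t t' : Nat} (h : t ≤ t') : ∀ n, pvGoodRank g vis L t n = true → pvGoodRank g vis L t' n = true := by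
  induction t' with
  | zero => intro n hn; rwa [Nat.le_zero.mp h] at hn
  | succ t' ih =>
    intro n hn
    rcases Nat.lt_or_ge t (t'+1) with hlt | hge
    · exact pvGoodRank_mono g vis L t' n (ih (by omega) n hn)
    · rwa [show t = t' + 1 by omega] at hn

theorem pvCnt_good_irrel (g : PySem.Dict Int (List Int)) (vis : PySem.Dict Int Int) (L : Int) :
    ∀ t n, pvGoodRank g vis L t n = true → ∀ f1 f2, t < f1 → t < f2 →
      pvCnt g vis L f1 n = pvCnt g vis L f2 n := by
  intro t
  induction t with
  | zero =>
    intro n h f1 f2 h1 h2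
    match f1, f2, h1, h2 with
    | a+1, b+1, _, _ =>
      simp only [pvCnt]
      cases hv : vis.get? n with
      | some v => rfl
      | none =>
        have hge : ¬ n < L := by
          intro hlt
          simp only [pvGoodRank, hv, Option.isNone_none, Bool.and_true,
            Bool.not_eq_eq_eq_not, Bool.not_true, decide_eq_false_iff_not] at h
          exact h hlt
        by_cases hnL : n = L
        · simp [hnL]
        · simp [hnL, show n > L by omega]
  | succ t ih =>
    intro n h f1 f2 h1 h2
    match f1, f2, h1, h2 with
    | a+1, b+1, h1', h2' =>
      simp only [pvCnt]
      cases hv : vis.get? n with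
      | some v => rfl
      | none =>
        by_cases hnL : n = L
        · simp [hnL]
        · by_cases hgt : n > L
          · simp [hnL, hgt]
          · have hlt : n < L := by omega
            simp only [if_neg hnL, if_neg hgt]
            rw [pvGoodRank_unf] at h
            simp only [Bool.or_eq_true] at h
            rcases h with h | h
            · rw [hv] at h; simp [hlt] at h
            · revert h
              cases hg : g.get? n with
              | none => intro h; rfl
              | some ns =>
                intro h
                dsimp only at h ⊢
                simp only [List.all_eq_true] at h
                congr 1
                apply List.map_congr_left
                intro m hm
                exact ih m (h m hm) a b (by omega) (by omega)

theorem pvAgo_spec (g : PySem.Dict Int (List Int)) (vis0 : PySem.Dict Int Int) (L : Int) (F : Nat) :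
    ∀ t, t < F →
    ∀ index, pvGoodRank g vis0 L t index = true →
    ∀ f, t < f → ∀ vis,
      (∀ k v, vis0.get? k = some v → vis.get? k = some v) →
      (∀ k v, vis.get? k = some v → v = pvCnt g vis0 L F k) →
      (pvAgo g L f index vis).1 = pvCnt g vis0 L F index
      ∧ (∀ k v, vis0.get? k = some v → (pvAgo g L f index vis).2.get? k = some v)
      ∧ (∀ k v, (pvAgo g L f index vis).2.get? k = some v → v = pvCnt g vis0 L F k) := by
  intro t
  induction t with
  | zero =>
    intro htF index hgood f hf vis hI1 hI2
    match f, hf with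
    | f'+1, _ =>
      obtain ⟨F', rfl⟩ : ∃ F', F = F' + 1 := ⟨F - 1, by omega⟩
      simp only [pvAgo]
      cases hv : vis.get? index with
      | some v =>
        dsimp only
        refine ⟨?_, hI1, hI2⟩
        exact (hI2 index v hv)
      | none =>
        have hv0 : vis0.get? index = none := by
          cases h0 : vis0.get? index with
          | none => rfl
          | some v => simp [hI1 index v h0] at hv
        have hge : ¬ index < L := by
          intro hlt
          simp only [pvGoodRank, hv0, Option.isNone_none, Bool.and_true,
            Bool.not_eq_eq_eq_not, Bool.not_true, decide_eq_false_iff_not] at hgood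
          exact hgood hlt
        by_cases hiL : index = L
        · simp only [if_pos hiL]
          refine ⟨?_, hI1, hI2⟩
          subst hiL
          simp [pvCnt, hv0]
        · have hgt : index > L := by omega
          simp only [if_neg hiL, if_pos hgt]
          refine ⟨?_, hI1, hI2⟩
          simp [pvCnt, hv0, hiL, hgt]
  | succ t ih =>
    intro htF index hgood f hf vis hI1 hI2
    match f, hf with
    | f'+1, hf =>
      obtain ⟨F', hF'⟩ : ∃ F', F = F' + 1 := ⟨F - 1, by omega⟩
      simp only [pvAgo]
      cases hv : vis.get? index with
      | some v =>
        dsimp only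
        exact ⟨hI2 index v hv, hI1, hI2⟩
      | none =>
        have hv0 : vis0.get? index = none := by
          cases h0 : vis0.get? index with
          | none => rfl
          | some v => simp [hI1 index v h0] at hv
        by_cases hiL : index = L
        · simp only [if_pos hiL]
          refine ⟨?_, hI1, hI2⟩
          rw [hF']
          subst hiL
          simp [pvCnt, hv0]
        · by_cases hgt : index > L
          · simp only [if_neg hiL, if_pos hgt]
            refine ⟨?_, hI1, hI2⟩
            rw [hF']
            simp [pvCnt, hv0, hiL, hgt]
          · have hlt : index < L := by omega
            simp only [if_neg hiL, if_neg hgt]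
            rw [pvGoodRank_unf] at hgood
            simp only [hv0, Option.isNone_none, Bool.and_true, decide_eq_true hlt,
              Bool.not_true, Bool.false_or] at hgood
            revert hgood
            cases hg : g.get? index with
            | none => intro hgood; cases hgood
            | some ns =>
              intro hgood
              dsimp only at hgood ⊢
              simp only [List.all_eq_true] at hgood
              have hfold : ∀ (ms : List Int), (∀ n ∈ ms, n ∈ ns) → ∀ (acc : Int) (w : PySem.Dict Int Int),
                  (∀ k v, vis0.get? k = some v → w.get? k = some v) →
                  (∀ k v, w.get? k = some v → v = pvCnt g vis0 L F k) →
                  (ms.foldl (fun (acc : Int × PySem.Dict Int Int) n =>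
                      let p := pvAgo g L f' n acc.2
                      (acc.1 + p.1, p.2)) (acc, w)).1
                    = acc + (ms.map (pvCnt g vis0 L F)).sum
                  ∧ (∀ k v, vis0.get? k = some v →
                      (ms.foldl (fun (acc : Int × PySem.Dict Int Int) n =>
                        let p := pvAgo g L f' n acc.2
                        (acc.1 + p.1, p.2)) (acc, w)).2.get? k = some v)
                  ∧ (∀ k v, (ms.foldl (fun (acc : Int × PySem.Dict Int Int) n =>
                        let p := pvAgo g L f' n acc.2
                        (acc.1 + p.1, p.2)) (acc, w)).2.get? k = some v → v = pvCnt g vis0 L F k) := by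
                intro ms
                induction ms with
                | nil => intro _ acc w hw1 hw2; exact ⟨by simp, hw1, hw2⟩
                | cons m ms' ihm =>
                  intro hmem acc w hw1 hw2
                  obtain ⟨hp1, hp2, hp3⟩ := ih (by omega) m (hgood m (hmem m (by simp)))
                    f' (by omega) w hw1 hw2
                  simp only [List.foldl_cons]
                  obtain ⟨hq1, hq2, hq3⟩ := ihm (fun n hn => hmem n (by simp [hn]))
                    (acc + (pvAgo g L f' m w).1) (pvAgo g L f' m w).2 hp2 hp3
                  refine ⟨?_, hq2, hq3⟩
                  rw [hq1, hp1]
                  simp [add_assoc]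
              obtain ⟨hr1, hr2, hr3⟩ := hfold ns (fun n h => h) 0 vis hI1 hI2
              set r := ns.foldl (fun (acc : Int × PySem.Dict Int Int) n =>
                      let p := pvAgo g L f' n acc.2
                      (acc.1 + p.1, p.2)) (0, vis) with hrdef
              have hrval : r.1 = pvCnt g vis0 L F index := by
                rw [hr1]
                have hcongr : List.map (pvCnt g vis0 L F) ns
                    = List.map (fun n => pvCnt g vis0 L F' n) ns :=
                  List.map_congr_left fun n hn =>
                    pvCnt_good_irrel g vis0 L t n (hgood n hn) F F' (by omega) (by omega)
                rw [hcongr, hF', pvCnt_unf, hv0]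
                dsimp only
                rw [if_neg hiL, if_neg hgt, hg]
                dsimp only
                omega
              refine ⟨?_, ?_, ?_⟩
              · rw [PySem.Dict.get?_insert_self]
                simpa using hrval
              · intro k v h0
                have hk : k ≠ index := by
                  intro h; subst h; rw [hv0] at h0; cases h0
                rw [PySem.Dict.get?_insert_of_ne _ _ hk]
                exact hr2 k v h0
              · intro k v h0
                rw [PySem.Dict.get?_insert] at h0
                split at h0
                · next heq => cases h0; rw [heq]; exact hrval
                · exact hr3 k v h0

-- the per-key step of a round
def pvStep (g : PySem.Dict Int (List Int)) (vis0 : PySem.Dict Int Int) (L : Int)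
    (w : PySem.Dict Int Int) (i : Int) : PySem.Dict Int Int :=
  if i < L ∧ vis0.get? i = none ∧ w.get? i = none then
    let vals := (g.getD i []).map (pvResolve vis0 L w)
    if vals.all Option.isSome then w.insert i ((vals.map (fun o => o.getD 0)).sum) else w
  else w

theorem pvRound_eq (g : PySem.Dict Int (List Int)) (vis0 : PySem.Dict Int Int) (L : Int)
    (w : PySem.Dict Int Int) : pvRound g vis0 L w = g.keys.foldl (pvStep g vis0 L) w := rfl

-- the soundness invariant of B's table
def pvWInv (g : PySem.Dict Int (List Int)) (vis0 : PySem.Dict Int Int) (L : Int)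
    (w : PySem.Dict Int Int) : Prop :=
  w.keys.Nodup
  ∧ (∀ k, w.get? k ≠ none → g.get? k ≠ none ∧ k < L ∧ vis0.get? k = none)
  ∧ (∀ k v, w.get? k = some v →
      pvGoodRank g vis0 L w.keys.length k = true
      ∧ v = pvCnt g vis0 L (g.keys.length + 1) k)

theorem pvStep_mono (g : PySem.Dict Int (List Int)) (vis0 : PySem.Dict Int Int) (L : Int)
    (w : PySem.Dict Int Int) (i : Int) :
    ∀ k v, w.get? k = some v → (pvStep g vis0 L w i).get? k = some v := by
  intro k v h
  unfold pvStep
  dsimp only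
  split_ifs with hc hall
  · have hk : k ≠ i := fun he => by rw [he, hc.2.2] at h; cases h
    rw [PySem.Dict.get?_insert_of_ne _ _ hk]; exact h
  · exact h
  · exact h

theorem pvResolve_mono (vis0 : PySem.Dict Int Int) (L : Int)
    (w w' : PySem.Dict Int Int)
    (hmono : ∀ k v, w.get? k = some v → w'.get? k = some v) (n : Int)
    (h : (pvResolve vis0 L w n).isSome = true) : (pvResolve vis0 L w' n).isSome = true := by
  unfold pvResolve at h ⊢
  cases hv : vis0.get? n with
  | some v => simp
  | none =>
    rw [hv] at h
    dsimp only at h ⊢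
    split_ifs at h ⊢ with h1 h2
    · simp
    · simp
    · cases hw : w.get? n with
      | none => rw [hw] at h; cases h
      | some v => rw [hmono n v hw]; simp

theorem pvResolve_val (g : PySem.Dict Int (List Int)) (vis0 : PySem.Dict Int Int) (L : Int)
    (w : PySem.Dict Int Int)
    (hKpos : 1 ≤ g.keys.length)
    (hlen : w.keys.length < g.keys.length)
    (hent : ∀ k v, w.get? k = some v →
      pvGoodRank g vis0 L w.keys.length k = true ∧ v = pvCnt g vis0 L (g.keys.length + 1) k)
    (n : Int) (hs : (pvResolve vis0 L w n).isSome = true) :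
    pvGoodRank g vis0 L w.keys.length n = true
    ∧ (pvResolve vis0 L w n).getD 0 = pvCnt g vis0 L g.keys.length n := by
  obtain ⟨K', hK'⟩ : ∃ K', g.keys.length = K' + 1 := ⟨g.keys.length - 1, by omega⟩
  unfold pvResolve at hs ⊢
  cases hv : vis0.get? n with
  | some v =>
    constructor
    · refine pvGoodRank_le g vis0 L (Nat.zero_le _) n ?_
      simp [pvGoodRank, hv]
    · rw [hK', pvCnt_unf, hv]
      rfl
  | none =>
    rw [hv] at hs
    dsimp only at hs ⊢
    by_cases h1 : n = L
    · rw [if_pos h1]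
      constructor
      · refine pvGoodRank_le g vis0 L (Nat.zero_le _) n ?_
        simp [pvGoodRank, h1]
      · rw [hK', pvCnt_unf, hv]
        dsimp only
        rw [if_pos h1]
        rfl
    · rw [if_neg h1] at hs ⊢
      by_cases h2 : n > L
      · rw [if_pos h2]
        constructor
        · refine pvGoodRank_le g vis0 L (Nat.zero_le _) n ?_
          simp [pvGoodRank]
          omega
        · rw [hK', pvCnt_unf, hv]
          dsimp only
          rw [if_neg h1, if_pos h2]
          rfl
      · rw [if_neg h2] at hs ⊢
        cases hw : w.get? n with
        | none => rw [hw] at hs; cases hs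
        | some v =>
          obtain ⟨hg1, hg2⟩ := hent n v hw
          refine ⟨hg1, ?_⟩
          simp only [Option.getD_some]
          rw [hg2]
          exact pvCnt_good_irrel g vis0 L w.keys.length n hg1
            (g.keys.length + 1) g.keys.length (by omega) (by omega)

theorem pvStep_inv (g : PySem.Dict Int (List Int)) (vis0 : PySem.Dict Int Int) (L : Int)
    (w : PySem.Dict Int Int) (i : Int) (hi : i ∈ g.keys) (h : pvWInv g vis0 L w) :
    pvWInv g vis0 L (pvStep g vis0 L w i) := by
  obtain ⟨hnd, hmem, hent⟩ := h
  unfold pvStep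
  dsimp only
  split_ifs with hc hall
  · obtain ⟨hiL, hiv, hiw⟩ := hc
    have hgi : g.get? i ≠ none := by
      intro hnone
      rw [PySem.Dict.get?_eq_none_iff_not_mem_keys] at hnone
      exact hnone hi
    obtain ⟨ns, hg⟩ : ∃ ns, g.get? i = some ns := by
      cases hgg : g.get? i with
      | none => exact absurd hgg hgi
      | some ns => exact ⟨ns, rfl⟩
    have hgd : g.getD i [] = ns := PySem.Dict.getD_of_get?_eq_some g [] hg
    have hcont : w.contains i = false := by
      rw [PySem.Dict.contains_eq_isSome_get?, hiw]; rfl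
    have hkeys : (w.insert i ((((g.getD i []).map (pvResolve vis0 L w)).map (fun o => o.getD 0)).sum)).keys
        = w.keys ++ [i] := PySem.Dict.keys_insert_of_not_contains w _ hcont
    have hinotw : i ∉ w.keys := (PySem.Dict.get?_eq_none_iff_not_mem_keys w i).mp hiw
    have hsubs : ∀ k ∈ w.keys, k ∈ g.keys := by
      intro k hk
      have h1 : w.get? k ≠ none := fun hnone =>
        ((PySem.Dict.get?_eq_none_iff_not_mem_keys w k).mp hnone) hk
      have h2 := (hmem k h1).1
      by_contra hkk
      exact h2 ((PySem.Dict.get?_eq_none_iff_not_mem_keys g k).mpr hkk)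
    have hlen : w.keys.length + 1 ≤ g.keys.length := by
      have hnd2 : (i :: w.keys).Nodup := List.nodup_cons.mpr ⟨hinotw, hnd⟩
      have hsub2 : (i :: w.keys) ⊆ g.keys := by
        intro k hk
        rcases List.mem_cons.mp hk with rfl | hk
        · exact hi
        · exact hsubs k hk
      have := (List.subperm_of_subset hnd2 hsub2).length_le
      simpa using this
    have hKpos : 1 ≤ g.keys.length := by omega
    have hallres : ∀ n ∈ ns, (pvResolve vis0 L w n).isSome = true := by
      intro n hn
      rw [hgd] at hall
      simp only [List.all_eq_true, List.mem_map] at hall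
      exact hall _ ⟨n, hn, rfl⟩
    have hres := fun n hn => pvResolve_val g vis0 L w hKpos (by omega) hent n (hallres n hn)
    have hsum : (((g.getD i []).map (pvResolve vis0 L w)).map (fun o => o.getD 0)).sum
        = pvCnt g vis0 L (g.keys.length + 1) i := by
      rw [hgd, pvCnt_unf, hiv]
      dsimp only
      rw [if_neg (by omega : ¬ i = L), if_neg (by omega : ¬ i > L), hg]
      dsimp only
      rw [List.map_map]
      exact congrArg List.sum (List.map_congr_left fun n hn => (hres n hn).2)
    have hgoodi : pvGoodRank g vis0 L (w.keys.length + 1) i = true := by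
      rw [pvGoodRank_unf, hg]
      simp only [Bool.or_eq_true, List.all_eq_true]
      exact Or.inr fun n hn => (hres n hn).1
    refine ⟨?_, ?_, ?_⟩
    · exact PySem.Dict.nodup_keys_insert _ _ _ hnd
    · intro k hk
      rw [PySem.Dict.get?_insert] at hk
      split at hk
      · next heq => subst heq; exact ⟨hgi, hiL, hiv⟩
      · exact hmem k hk
    · intro k v hk
      rw [PySem.Dict.get?_insert] at hk
      rw [hkeys, List.length_append, List.length_singleton]
      split at hk
      · next heq =>
        subst heq
        refine ⟨hgoodi, ?_⟩
        cases hk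
        exact hsum
      · obtain ⟨hg1, hg2⟩ := hent k v hk
        exact ⟨pvGoodRank_mono g vis0 L _ k hg1, hg2⟩
  · exact ⟨hnd, hmem, hent⟩
  · exact ⟨hnd, hmem, hent⟩

theorem pvFoldStep_mono (g : PySem.Dict Int (List Int)) (vis0 : PySem.Dict Int Int) (L : Int) :
    ∀ (l : List Int) (w : PySem.Dict Int Int) (k v : Int), w.get? k = some v →
      (l.foldl (pvStep g vis0 L) w).get? k = some v := by
  intro l
  induction l with
  | nil => intro w k v h; exact h
  | cons i l ih =>
    intro w k v h
    exact ih _ k v (pvStep_mono g vis0 L w i k v h)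

theorem pvRound_mono (g : PySem.Dict Int (List Int)) (vis0 : PySem.Dict Int Int) (L : Int)
    (w : PySem.Dict Int Int) :
    ∀ k v, w.get? k = some v → (pvRound g vis0 L w).get? k = some v := by
  intro k v h
  rw [pvRound_eq]
  exact pvFoldStep_mono g vis0 L g.keys w k v h

theorem pvRound_inv (g : PySem.Dict Int (List Int)) (vis0 : PySem.Dict Int Int) (L : Int)
    (w : PySem.Dict Int Int) (h : pvWInv g vis0 L w) : pvWInv g vis0 L (pvRound g vis0 L w) := by
  rw [pvRound_eq]
  have : ∀ (l : List Int), (∀ x ∈ l, x ∈ g.keys) → ∀ w, pvWInv g vis0 L w →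
      pvWInv g vis0 L (l.foldl (pvStep g vis0 L) w) := by
    intro l
    induction l with
    | nil => intro _ w h; exact h
    | cons i l ih =>
      intro hmem w h
      exact ih (fun x hx => hmem x (by simp [hx])) _
        (pvStep_inv g vis0 L w i (hmem i (by simp)) h)
  exact this g.keys (fun x hx => hx) w h

theorem pvIter_inv (g : PySem.Dict Int (List Int)) (vis0 : PySem.Dict Int Int) (L : Int) :
    ∀ r, pvWInv g vis0 L ((pvRound g vis0 L)^[r] PySem.Dict.empty) := by
  intro r
  induction r with
  | zero =>
    simp only [Function.iterate_zero, id_eq]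
    refine ⟨by simp [PySem.Dict.keys_empty], ?_, ?_⟩
    · intro k hk; exact absurd (PySem.Dict.get?_empty k) hk
    · intro k v hk; rw [PySem.Dict.get?_empty] at hk; cases hk
  | succ r ih =>
    rw [Function.iterate_succ_apply']
    exact pvRound_inv g vis0 L _ ih

-- the fold over the keys reaches n and inserts it once all its neighbours resolve
theorem pvFoldStep_achieve (g : PySem.Dict Int (List Int)) (vis0 : PySem.Dict Int Int) (L : Int)
    (n : Int) (ns : List Int) (hg : g.get? n = some ns) (hnL : n < L) (hnv : vis0.get? n = none) :
    ∀ (l : List Int) (w : PySem.Dict Int Int), n ∈ l →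
      (∀ m ∈ ns, (pvResolve vis0 L w m).isSome = true) →
      (l.foldl (pvStep g vis0 L) w).get? n ≠ none := by
  intro l
  induction l with
  | nil => intro w h; cases h
  | cons i l ih =>
    intro w hn hres
    have hstepmono := pvStep_mono g vis0 L w i
    have hres' : ∀ m ∈ ns, (pvResolve vis0 L (pvStep g vis0 L w i) m).isSome = true :=
      fun m hm => pvResolve_mono vis0 L w _ hstepmono m (hres m hm)
    by_cases hin : i = n
    · subst hin
      cases hw : w.get? i with
      | some v =>
        simp only [List.foldl_cons]
        rw [pvFoldStep_mono g vis0 L l _ i v (hstepmono i v hw)]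
        simp
      | none =>
        have hstep : (pvStep g vis0 L w i).get? i ≠ none := by
          unfold pvStep
          dsimp only
          rw [if_pos ⟨hnL, hnv, hw⟩]
          have hall : (((g.getD i []).map (pvResolve vis0 L w)).all Option.isSome) = true := by
            rw [PySem.Dict.getD_of_get?_eq_some g [] hg]
            simp only [List.all_eq_true, List.mem_map]
            rintro o ⟨m, hm, rfl⟩
            exact hres m hm
          rw [if_pos hall, PySem.Dict.get?_insert_self]
          simp
        obtain ⟨v, hv⟩ : ∃ v, (pvStep g vis0 L w i).get? i = some v := by
          cases hs : (pvStep g vis0 L w i).get? i with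
          | none => exact absurd hs hstep
          | some v => exact ⟨v, rfl⟩
        simp only [List.foldl_cons]
        rw [pvFoldStep_mono g vis0 L l _ i v hv]
        simp
    · simp only [List.foldl_cons]
      exact ih _ ((List.mem_cons.mp hn).resolve_left (fun he => hin he.symm)) hres'

theorem pvIter_complete (g : PySem.Dict Int (List Int)) (vis0 : PySem.Dict Int Int) (L : Int) :
    ∀ r t n, t ≤ r → pvGoodRank g vis0 L t n = true → n < L → vis0.get? n = none →
      ((pvRound g vis0 L)^[r] PySem.Dict.empty).get? n ≠ none := by
  intro r
  induction r with
  | zero =>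
    intro t n ht hgood hnL hnv
    interval_cases t
    simp [pvGoodRank, hnv, hnL] at hgood
  | succ r ih =>
    intro t n ht hgood hnL hnv
    by_cases htr : t ≤ r
    · obtain ⟨v, hv⟩ : ∃ v, ((pvRound g vis0 L)^[r] PySem.Dict.empty).get? n = some v := by
        cases hs : ((pvRound g vis0 L)^[r] PySem.Dict.empty).get? n with
        | none => exact absurd hs (ih t n htr hgood hnL hnv)
        | some v => exact ⟨v, rfl⟩
      rw [Function.iterate_succ_apply']
      rw [pvRound_mono g vis0 L _ n v hv]
      simp
    · have hteq : t = r + 1 := by omega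
      subst hteq
      rw [pvGoodRank_unf] at hgood
      simp only [hnv, Option.isNone_none, Bool.and_true, decide_eq_true hnL,
        Bool.not_true, Bool.false_or] at hgood
      revert hgood
      cases hg : g.get? n with
      | none => intro hgood; cases hgood
      | some ns =>
        intro hgood
        dsimp only at hgood
        simp only [List.all_eq_true] at hgood
        rw [Function.iterate_succ_apply', pvRound_eq]
        have hnk : n ∈ g.keys := by
          by_contra hnk
          rw [((PySem.Dict.get?_eq_none_iff_not_mem_keys g n).mpr hnk)] at hg
          cases hg
        refine pvFoldStep_achieve g vis0 L n ns hg hnL hnv g.keys _ hnk ?_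
        intro m hm
        unfold pvResolve
        cases hmv : vis0.get? m with
        | some v => simp
        | none =>
          dsimp only
          by_cases h1 : m = L
          · simp [h1]
          · rw [if_neg h1]
            by_cases h2 : m > L
            · simp [h2]
            · rw [if_neg h2]
              have hmL : m < L := by omega
              obtain ⟨v, hv⟩ : ∃ v, ((pvRound g vis0 L)^[r] PySem.Dict.empty).get? m = some v := by
                cases hs : ((pvRound g vis0 L)^[r] PySem.Dict.empty).get? m with
                | none => exact absurd hs (ih r m le_rfl (hgood m hm) hmL hmv)
                | some v => exact ⟨v, rfl⟩
              rw [hv]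
              simp

theorem pvFoldConst {α β : Type} (f : β → β) :
    ∀ (l : List α) (w : β), l.foldl (fun w _ => f w) w = f^[l.length] w := by
  intro l
  induction l with
  | nil => intro w; rfl
  | cons a l ih =>
    intro w
    simp only [List.foldl_cons, List.length_cons, ih, Function.iterate_succ_apply]

-- ===== VERDICT (by name: the statement is the Claim_ definition above) =====
theorem get_number_of_all_paths_spec : Claim_equal_get_number_of_all_paths := by
  intro graph index pattern visited _ hpre
  unfold Spec_get_number_of_all_paths
  unfold Pre_get_number_of_all_paths at hpre
  simp only [get_number_of_all_paths, get_number_of_all_paths_alt]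
  cases h : (PySem.Dict.mk visited).get? index with
  | some v =>
    simp [pvAgo, h]
  | none =>
    by_cases hiL : index = PySem.Str.len pattern
    · subst hiL
      rw [PySem.Str.len_eq] at h
      simp only [String.length_toList] at h
      simp [pvAgo, h, PySem.Str.len_eq]
    · by_cases hgt : index > PySem.Str.len pattern
      · have hgt' : ((pattern.length : Nat) : Int) < index := by
          simpa [PySem.Str.len_eq] using hgt
        have hne' : ¬ index = ((pattern.length : Nat) : Int) := by
          simpa [PySem.Str.len_eq] using hiL
        simp [pvAgo, h, hne', hgt']
      · have hlt : index < PySem.Str.len pattern := by omega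
        obtain ⟨hA, -, -⟩ := pvAgo_spec (PySem.Dict.mk graph) (PySem.Dict.mk visited)
          (PySem.Str.len pattern) ((PySem.Dict.mk graph).keys.length + 1)
          ((PySem.Dict.mk graph).keys.length) (by omega) index hpre
          ((PySem.Dict.mk graph).keys.length + 1) (by omega) (PySem.Dict.mk visited)
          (fun _ _ hv => hv)
          (fun k v hv => by rw [pvCnt_unf, hv])
        rw [hA]
        have hne := pvIter_complete (PySem.Dict.mk graph) (PySem.Dict.mk visited)
          (PySem.Str.len pattern) ((PySem.Dict.mk graph).keys.length + 1)
          ((PySem.Dict.mk graph).keys.length) index (by omega) hpre hlt h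
        obtain ⟨v, hv⟩ : ∃ v,
            ((pvRound (PySem.Dict.mk graph) (PySem.Dict.mk visited) (PySem.Str.len pattern))^[(PySem.Dict.mk graph).keys.length + 1]
              PySem.Dict.empty).get? index = some v := by
          cases hs : ((pvRound (PySem.Dict.mk graph) (PySem.Dict.mk visited) (PySem.Str.len pattern))^[(PySem.Dict.mk graph).keys.length + 1]
              PySem.Dict.empty).get? index with
          | none => exact absurd hs hne
          | some v => exact ⟨v, rfl⟩
        have hval := ((pvIter_inv (PySem.Dict.mk graph) (PySem.Dict.mk visited)
          (PySem.Str.len pattern) ((PySem.Dict.mk graph).keys.length + 1)).2.2) index v hv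
        dsimp only
        rw [if_neg hiL, if_neg hgt]
        rw [pvFoldConst (pvRound (PySem.Dict.mk graph) (PySem.Dict.mk visited) (PySem.Str.len pattern))
          (List.range ((PySem.Dict.mk graph).keys.length + 1)) PySem.Dict.empty,
          List.length_range, hv]
        simp only [Option.getD_some]
        exact hval.2.symm
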